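-- pv_equiv track=rewrite | github.com/HEEE23/programmers | 프로그래머스/1/258712. 가장 많이 받은 선물/가장 많이 받은 선물.py | solution
-- ===== SOURCE A (Python) =====
-- def solution(friends, gifts):
--     answer = 0
--
--     # 각 친구들에게 선물 준 개수
--     give_gifts = {f : {j:0 for j in friends if j != f} for f in friends}
--
--     exponent = {f : 0 for f in friends}
--     for g in gifts:
--         give, receive = g.split(' ')
--         give_gifts[give][receive] += 1
--         exponent[give] += 1
--         exponent[receive] -= 1
--
--     for f in friends:
--         # 다음달에 받는 선물의 개수
--         present = 0
--         for ggc in give_gifts[f]: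
--             # 두 사람이 주고 받은 기록이 없거나 주고받은 수가 같을 때,
--             if (give_gifts[f][ggc] == 0 and give_gifts[ggc][f] == 0) or (give_gifts[f][ggc] == give_gifts[ggc][f]):
--                 # 선물 지수가 더 크면 다음달에 선물 받음
--                 if exponent[f] > exponent[ggc]:
--                     present += 1
--             else:
--                 # 친구에게 선물을 더 많이 줬으면,
--                 if give_gifts[f][ggc] > give_gifts[ggc][f]:
--                     # 다음달에 선물 받음
--                     present += 1
--
--         # 다음달에 가장 많은 선물을 받는 친구가 받을 선물의 수
--         answer = max(answer, present)
--
--     return answer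
-- ===== SOURCE B (Python) =====
-- def solution(friends, gifts):
--     names = list(dict.fromkeys(friends))
--     # single pass over gifts: net exchange per unordered pair + given/received totals
--     net = {}
--     given = {}
--     received = {}
--     for g in gifts:
--         a, b = g.split(' ')
--         k = (a, b) if a < b else (b, a)
--         net[k] = net.get(k, 0) + (1 if a == k[0] else -1)
--         given[a] = given.get(a, 0) + 1
--         received[b] = received.get(b, 0) + 1
--     expo = {f: given.get(f, 0) - received.get(f, 0) for f in names}
--     # rank by gift exponent: wins[f] starts at the number of friends with a
--     # strictly smaller exponent (the default outcome of every pair of f's)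
--     vals = sorted(expo[f] for f in names)
--     first = {}
--     for i, v in enumerate(vals):
--         if v not in first:
--             first[v] = i
--     wins = {f: first[expo[f]] for f in names}
--     # correct only the pairs that actually exchanged gifts unevenly
--     for a, b in net:
--         d = net[(a, b)]
--         if d > 0:
--             wins[a] += 1
--         elif d < 0:
--             wins[b] += 1
--         else:
--             continue
--         if expo[a] > expo[b]:
--             wins[a] -= 1
--         elif expo[b] > expo[a]:
--             wins[b] -= 1
--     return max((wins[f] for f in names), default=0)
-- ===== Notes on version B (the rewrite author's own statement) =====
-- stated objective: alternative
-- what changed: Instead of A's nested per-friend dict and a rescan of every friend's whole row against every other friend, B makes one pass over the gifts building a per-unordered-pair net counter plus given/received totals, ranks friends by sorting their gift exponents (a friend's rank = number of strictly smaller exponents = its default wins), and then corrects only the pairs that actually exchanged gifts, so no all-pairs loop is ever run.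
import Mathlib
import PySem

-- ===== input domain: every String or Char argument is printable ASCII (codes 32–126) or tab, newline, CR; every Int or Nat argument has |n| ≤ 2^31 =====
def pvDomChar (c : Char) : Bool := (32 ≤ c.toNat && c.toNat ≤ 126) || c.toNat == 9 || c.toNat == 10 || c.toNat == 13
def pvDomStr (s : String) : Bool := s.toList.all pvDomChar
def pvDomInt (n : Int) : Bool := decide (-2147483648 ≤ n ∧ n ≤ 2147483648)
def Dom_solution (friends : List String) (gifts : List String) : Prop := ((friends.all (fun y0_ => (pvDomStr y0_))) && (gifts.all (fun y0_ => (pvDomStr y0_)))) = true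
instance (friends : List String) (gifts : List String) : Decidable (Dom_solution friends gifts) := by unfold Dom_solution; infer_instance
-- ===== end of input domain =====

-- B replaces A's all-pairs row rescans by a one-pass per-pair net counter plus a sort-based
-- exponent ranking, correcting only the pairs that actually exchanged gifts (objective: alternative).

-- ===== PORT A =====
-- one step of A's gift loop, updating (give_gifts, exponent)
def solGiftStepA (s : PySem.Dict String (PySem.Dict String Int) × PySem.Dict String Int)
    (g : String) : PySem.Dict String (PySem.Dict String Int) × PySem.Dict String Int :=
  let parts := (PySem.Str.split? g " ").getD []
  let give := parts.getD 0 ""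
  let receive := parts.getD 1 ""
  (s.1.modify give .empty (fun inner => inner.modify receive 0 (· + 1)),
   (s.2.modify give 0 (· + 1)).modify receive 0 (· - 1))

def solution (friends : List String) (gifts : List String) : Int :=
  let answer : Int := 0
  -- give_gifts = {f : {j:0 for j in friends if j != f} for f in friends}
  let give_gifts : PySem.Dict String (PySem.Dict String Int) :=
    friends.foldl (fun d f =>
      d.insert f ((friends.filter (fun j => j ≠ f)).foldl (fun inner j => inner.insert j 0) .empty)) .empty
  -- exponent = {f : 0 for f in friends}
  let exponent : PySem.Dict String Int := friends.foldl (fun d f => d.insert f (0 : Int)) .empty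
  let st := gifts.foldl solGiftStepA (give_gifts, exponent)
  let give_gifts := st.1
  let exponent := st.2
  friends.foldl (fun answer f =>
    let present : Int := (give_gifts.getD f .empty).keys.foldl (fun present ggc =>
      let a := (give_gifts.getD f .empty).getD ggc 0
      let b := (give_gifts.getD ggc .empty).getD f 0
      if ((a == 0 && b == 0) || a == b) then
        (if exponent.getD f 0 > exponent.getD ggc 0 then present + 1 else present)
      else
        (if a > b then present + 1 else present)) 0
    max answer present) answer

-- ===== PORT B =====
-- one step of B's gift loop, updating (net, given, received)
def solGiftStepB (s : PySem.Dict (String × String) Int × PySem.Dict String Int × PySem.Dict String Int)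
    (g : String) : PySem.Dict (String × String) Int × PySem.Dict String Int × PySem.Dict String Int :=
  let parts := (PySem.Str.split? g " ").getD []
  let a := parts.getD 0 ""
  let b := parts.getD 1 ""
  let k := if a < b then (a, b) else (b, a)
  (s.1.insert k (s.1.getD k 0 + (if a = k.1 then 1 else -1)),
   s.2.1.insert a (s.2.1.getD a 0 + 1),
   s.2.2.insert b (s.2.2.getD b 0 + 1))

-- the shared tail of B's correction loop (undo the exponent-based default for this pair)
def solExpoAdj (expo : PySem.Dict String Int) (k : String × String)
    (w : PySem.Dict String Int) : PySem.Dict String Int :=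
  if expo.getD k.1 0 > expo.getD k.2 0 then w.insert k.1 (w.getD k.1 0 - 1)
  else if expo.getD k.2 0 > expo.getD k.1 0 then w.insert k.2 (w.getD k.2 0 - 1)
  else w

-- body of B's 'for a, b in net' loop
def solAdjStep (net : PySem.Dict (String × String) Int) (expo : PySem.Dict String Int)
    (w : PySem.Dict String Int) (k : String × String) : PySem.Dict String Int :=
  let d := net.getD k 0
  if d > 0 then solExpoAdj expo k (w.insert k.1 (w.getD k.1 0 + 1))
  else if d < 0 then solExpoAdj expo k (w.insert k.2 (w.getD k.2 0 + 1))
  else w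

def solution_alt (friends : List String) (gifts : List String) : Int :=
  let names := PySem.List.dedup friends
  let st := gifts.foldl solGiftStepB (.empty, .empty, .empty)
  let net := st.1
  let given := st.2.1
  let received := st.2.2
  let expo : PySem.Dict String Int :=
    names.foldl (fun d f => d.insert f (given.getD f 0 - received.getD f 0)) .empty
  let vals := PySem.List.sorted (names.map (fun f => expo.getD f 0)) (fun v => v) false
  let first : PySem.Dict Int Int :=
    (PySem.List.enumerate vals).foldl
      (fun d p => if d.contains p.2 then d else d.insert p.2 p.1) .empty
  let wins : PySem.Dict String Int :=
    names.foldl (fun d f => d.insert f (first.getD (expo.getD f 0) 0)) .empty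
  let wins := net.keys.foldl (solAdjStep net expo) wins
  PySem.List.maxD (names.map (fun f => wins.getD f 0)) id 0

-- ===== PRECONDITION & SPEC =====
-- Pre_ excludes exactly the inputs on which A raises: a gift string that does not split on ' '
-- into exactly two parts (ValueError on unpacking), or whose giver/receiver is not a friend or
-- refers to the same friend twice (KeyError in give_gifts).
def Pre_solution (friends : List String) (gifts : List String) : Prop :=
  ∀ g ∈ gifts,
    ((PySem.Str.split? g " ").getD []).length = 2 ∧
    ((PySem.Str.split? g " ").getD []).getD 0 "" ∈ friends ∧
    ((PySem.Str.split? g " ").getD []).getD 1 "" ∈ friends ∧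
    ((PySem.Str.split? g " ").getD []).getD 0 "" ≠ ((PySem.Str.split? g " ").getD []).getD 1 ""
instance (friends : List String) (gifts : List String) : Decidable (Pre_solution friends gifts) := by
  unfold Pre_solution; infer_instance
def pvWitness_solution : List String × List String := (["a", "b"], ["a b"])

def Spec_solution (friends : List String) (gifts : List String) (out : Int) : Prop :=
  out = solution_alt friends gifts
instance (friends : List String) (gifts : List String) (out : Int) : Decidable (Spec_solution friends gifts out) := by
  unfold Spec_solution; infer_instance

-- ===== CLAIM (what is proved, stated in full; the proofs are below) =====
def Claim_equal_solution : Prop := ∀ (friends : List String) (gifts : List String),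
  Dom_solution friends gifts → Pre_solution friends gifts → Spec_solution friends gifts (solution friends gifts)

-- ===== LEMMAS AND PROOFS =====

-- the parsed (giver, receiver) pair of a gift string
def solParse (g : String) : String × String :=
  (((PySem.Str.split? g " ").getD []).getD 0 "", ((PySem.Str.split? g " ").getD []).getD 1 "")

-- number of gifts from a to b
def solCnt (gifts : List String) (a b : String) : Int := ((gifts.map solParse).count (a, b) : Int)

-- gift exponent: given minus received
def solExpo (gifts : List String) (f : String) : Int :=
  ((gifts.map (fun g => (solParse g).1)).count f : Int) - ((gifts.map (fun g => (solParse g).2)).count f : Int)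

-- who receives a gift next month out of the pair (x, y): x iff solWin x y
def solWin (gifts : List String) (x y : String) : Bool :=
  if solCnt gifts x y = solCnt gifts y x then decide (solExpo gifts x > solExpo gifts y)
  else decide (solCnt gifts x y > solCnt gifts y x)

-- B's canonical (sorted) key for the unordered pair {x, y}
def solCanon (x y : String) : String × String := if x < y then (x, y) else (y, x)
def solCanonParse (g : String) : String × String := solCanon (solParse g).1 (solParse g).2

-- net exchange between f and g, and B's correction value for the pair (as a spec function)
def solNetv (gifts : List String) (x y : String) : Int := solCnt gifts x y - solCnt gifts y x
def solDval (gifts : List String) (f g : String) : Int :=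
  if solNetv gifts f g = 0 then 0
  else (if solNetv gifts f g > 0 then 1 else 0) - (if solExpo gifts f > solExpo gifts g then 1 else 0)

-- B's per-key correction, read off the dictionaries
def solDelta (net : PySem.Dict (String × String) Int) (expo : PySem.Dict String Int)
    (f : String) (k : String × String) : Int :=
  if net.getD k 0 = 0 then 0
  else (if f = (if net.getD k 0 > 0 then k.1 else k.2) then 1 else 0)
     - (if expo.getD k.1 0 > expo.getD k.2 0 then (if f = k.1 then 1 else 0)
        else if expo.getD k.2 0 > expo.getD k.1 0 then (if f = k.2 then 1 else 0) else 0)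

-- a fold of inserts with values computed from the key: lookup afterwards
theorem L_foldl_insert_getD {ν : Type} (v : String → ν) (d0 : ν) :
    ∀ (L : List String) (d : PySem.Dict String ν) (f : String),
    (L.foldl (fun d x => d.insert x (v x)) d).getD f d0 = if f ∈ L then v f else d.getD f d0 := by
  intro L
  induction L with
  | nil => simp
  | cons x xs ih =>
    intro d f
    simp only [List.foldl_cons, ih, List.mem_cons, PySem.Dict.getD_insert]
    by_cases hx : f ∈ xs
    · simp [hx]
    · by_cases hfx : f = x <;> simp [hx, hfx]

-- inserting one gift into the net counter (explicit-variable helper for L_netB)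
theorem L_netIns (d : PySem.Dict (String × String) Int) (a b x y : String) (hxy : x < y) :
    (d.insert (if a < b then (a, b) else (b, a))
      (d.getD (if a < b then (a, b) else (b, a)) 0 + (if a = (if a < b then (a, b) else (b, a)).1 then 1 else -1))).getD (x, y) 0
    = d.getD (x, y) 0 + ((if (a, b) = (x, y) then 1 else 0) - (if (a, b) = (y, x) then 1 else 0)) := by
  by_cases hab : a < b
  · simp only [if_pos hab]
    simp only [if_true]
    rw [PySem.Dict.getD_insert]
    by_cases hk : ((x, y) : String × String) = (a, b)
    · have hx1 : x = a := congrArg Prod.fst hk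
      rw [if_pos hk, if_pos (hk.symm), if_neg (fun h => by
        have h1 : a = y := congrArg Prod.fst h
        exact lt_irrefl y ((hx1.trans h1) ▸ hxy)), hk]
      omega
    · rw [if_neg hk, if_neg (fun h => hk h.symm), if_neg (fun h => by
        have h1 : a = y := congrArg Prod.fst h
        have h2 : b = x := congrArg Prod.snd h
        rw [h1, h2] at hab
        exact lt_asymm hxy hab)]
      omega
  · simp only [if_neg hab]
    rw [PySem.Dict.getD_insert]
    by_cases hk : ((x, y) : String × String) = (b, a)
    · have hx1 : x = b := congrArg Prod.fst hk
      have hy1 : y = a := congrArg Prod.snd hk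
      have hne : ¬ a = b := fun h => by
        rw [hx1, hy1, h] at hxy
        exact lt_irrefl b hxy
      rw [if_pos hk, if_neg hne, if_neg (fun h => hne ((show a = x from congrArg Prod.fst h).trans hx1)), if_pos (by rw [hx1, hy1]), hk]
      omega
    · rw [if_neg hk, if_neg (fun h => by
        have h1 : a = x := congrArg Prod.fst h
        have h2 : b = y := congrArg Prod.snd h
        rw [h1, h2] at hab
        exact hab hxy), if_neg (fun h => hk (by
        have h1 : a = y := congrArg Prod.fst h
        have h2 : b = x := congrArg Prod.snd h
        rw [← h2, ← h1]))]
      omega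

-- B's gift fold: the net counter holds cnt x y - cnt y x at the sorted key (x, y)
theorem L_netB (x y : String) (hxy : x < y) :
    ∀ (gifts : List String)
      (s : PySem.Dict (String × String) Int × PySem.Dict String Int × PySem.Dict String Int),
    ((gifts.foldl solGiftStepB s).1).getD (x, y) 0
      = s.1.getD (x, y) 0 + (solCnt gifts x y - solCnt gifts y x) := by
  intro gifts
  induction gifts with
  | nil => intro s; simp [solCnt]
  | cons g gs ih =>
    intro s
    simp only [List.foldl_cons]
    rw [ih]
    have hstep : (solGiftStepB s g).1.getD (x, y) 0
        = s.1.getD (x, y) 0 + ((if solParse g = (x, y) then 1 else 0) - (if solParse g = (y, x) then 1 else 0)) :=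
      L_netIns s.1 _ _ x y hxy
    rw [hstep]
    simp only [solCnt, List.map_cons, List.count_cons]
    by_cases h1 : solParse g = (x, y) <;> by_cases h2 : solParse g = (y, x) <;>
      simp [h1, h2] <;> omega

-- B's gift fold: the given/received counters count parsed givers/receivers
theorem L_givenB (gifts : List String) :
    ∀ (s : PySem.Dict (String × String) Int × PySem.Dict String Int × PySem.Dict String Int)
      (f : String),
    ((gifts.foldl solGiftStepB s).2.1).getD f 0 = s.2.1.getD f 0 + ((gifts.map (fun g => (solParse g).1)).count f : Int) := by
  induction gifts with
  | nil => simp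
  | cons g gs ih =>
    intro s f
    simp only [List.foldl_cons, List.map_cons]
    rw [ih]
    have hstep : (solGiftStepB s g).2.1.getD f 0 = s.2.1.getD f 0 + (if f = (solParse g).1 then 1 else 0) := by
      simp only [solGiftStepB]
      rw [PySem.Dict.getD_insert]
      simp only [solParse]
      split_ifs with h1
      · rw [h1]
      · omega
    rw [hstep, List.count_cons]
    by_cases h : f = (solParse g).1
    case pos => simp [h]; omega
    case neg => simp [h]; exact fun hh => h hh.symm

theorem L_recvB (gifts : List String) :
    ∀ (s : PySem.Dict (String × String) Int × PySem.Dict String Int × PySem.Dict String Int)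
      (f : String),
    ((gifts.foldl solGiftStepB s).2.2).getD f 0 = s.2.2.getD f 0 + ((gifts.map (fun g => (solParse g).2)).count f : Int) := by
  induction gifts with
  | nil => simp
  | cons g gs ih =>
    intro s f
    simp only [List.foldl_cons, List.map_cons]
    rw [ih]
    have hstep : (solGiftStepB s g).2.2.getD f 0 = s.2.2.getD f 0 + (if f = (solParse g).2 then 1 else 0) := by
      simp only [solGiftStepB]
      rw [PySem.Dict.getD_insert]
      simp only [solParse]
      split_ifs with h1
      · rw [h1]
      · omega
    rw [hstep, List.count_cons]
    by_cases h : f = (solParse g).2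
    case pos => simp [h]; omega
    case neg => simp [h]; exact fun hh => h hh.symm

-- B's gift fold: the keys of the net counter are the canonical parsed pairs
theorem L_keysB_mem (gifts : List String) :
    ∀ (s : PySem.Dict (String × String) Int × PySem.Dict String Int × PySem.Dict String Int)
      (k : String × String),
    k ∈ ((gifts.foldl solGiftStepB s).1).keys ↔ k ∈ s.1.keys ∨ (∃ g ∈ gifts, solCanonParse g = k) := by
  induction gifts with
  | nil => simp
  | cons g gs ih =>
    intro s k
    simp only [List.foldl_cons]
    rw [ih]
    have hstep : k ∈ (solGiftStepB s g).1.keys ↔ k = solCanonParse g ∨ k ∈ s.1.keys :=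
      PySem.Dict.mem_keys_insert (d := s.1)
        (k := solCanonParse g)
        (v := s.1.getD (solCanonParse g) 0
          + (if (solParse g).1 = (solCanonParse g).1 then 1 else -1)) (k' := k)
    rw [hstep]
    simp only [List.mem_cons]
    constructor
    · rintro ((h | h) | h)
      · exact Or.inr ⟨g, Or.inl rfl, h.symm⟩
      · exact Or.inl h
      · obtain ⟨g', hg', he⟩ := h
        exact Or.inr ⟨g', Or.inr hg', he⟩
    · rintro (h | ⟨g', (rfl | hg'), he⟩)
      · exact Or.inl (Or.inr h)
      · exact Or.inl (Or.inl he.symm)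
      · exact Or.inr ⟨g', hg', he⟩

theorem L_keysB_nodup (gifts : List String) :
    ∀ (s : PySem.Dict (String × String) Int × PySem.Dict String Int × PySem.Dict String Int),
    s.1.keys.Nodup → ((gifts.foldl solGiftStepB s).1).keys.Nodup := by
  induction gifts with
  | nil => intro s h; exact h
  | cons g gs ih =>
    intro s h
    simp only [List.foldl_cons]
    refine ih _ ?_
    simp only [solGiftStepB]
    exact PySem.Dict.nodup_keys_insert _ _ _ h

-- first-occurrence dict built over enumerate: lookup gives start + index of first occurrence
theorem L_first_gen (v : Int) :
    ∀ (s : List Int) (n : Int) (d : PySem.Dict Int Int),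
    ((PySem.List.enumerate s n).foldl (fun d p => if d.contains p.2 then d else d.insert p.2 p.1) d).getD v 0
      = if d.contains v = false ∧ v ∈ s then n + (s.idxOf v : Int) else d.getD v 0 := by
  intro s
  induction s with
  | nil => intro n d; simp
  | cons x xs ih =>
    intro n d
    simp only [PySem.List.enumerate_cons, List.foldl_cons]
    rw [ih]
    by_cases hdx : d.contains x = true
    · rw [if_pos hdx]
      by_cases hvx : v = x
      · subst hvx
        rw [if_neg (by rintro ⟨h, _⟩; rw [hdx] at h; cases h),
          if_neg (by rintro ⟨h, _⟩; rw [hdx] at h; cases h)]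
      · by_cases hm2 : v ∈ xs
        · by_cases hcv : d.contains v = false
          · rw [if_pos ⟨hcv, hm2⟩, if_pos ⟨hcv, List.mem_cons_of_mem _ hm2⟩,
              List.idxOf_cons_ne _ (fun h => hvx h.symm)]
            push_cast
            ring
          · rw [if_neg (fun h => hcv h.1), if_neg (fun h => hcv h.1)]
        · rw [if_neg (fun h => hm2 h.2), if_neg (by
            rintro ⟨_, h⟩
            rcases List.mem_cons.mp h with h | h
            · exact hvx h
            · exact hm2 h)]
    · rw [if_neg hdx]
      by_cases hvx : v = x
      · subst hvx
        rw [if_neg (by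
            rintro ⟨h, _⟩
            rw [PySem.Dict.contains_insert_self] at h
            cases h),
          PySem.Dict.getD_insert_self,
          if_pos ⟨by simpa using hdx, List.mem_cons_self⟩, List.idxOf_cons_self]
        simp
      · have hc : (d.insert x n).contains v = d.contains v := by
          rw [PySem.Dict.contains_insert]
          simp [hvx]
        have hgd : (d.insert x n).getD v 0 = d.getD v 0 := by
          rw [PySem.Dict.getD_insert, if_neg hvx]
        rw [hc, hgd]
        by_cases hm2 : v ∈ xs
        · by_cases hcv : d.contains v = false
          · rw [if_pos ⟨hcv, hm2⟩, if_pos ⟨hcv, List.mem_cons_of_mem _ hm2⟩,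
              List.idxOf_cons_ne _ (fun h => hvx h.symm)]
            push_cast
            ring
          · rw [if_neg (fun h => hcv h.1), if_neg (fun h => hcv h.1)]
        · rw [if_neg (fun h => hm2 h.2), if_neg (by
            rintro ⟨_, h⟩
            rcases List.mem_cons.mp h with h | h
            · exact hvx h
            · exact hm2 h)]

-- in a ≤-sorted list, the index of the first occurrence of v counts the elements < v
theorem L_idxOf_sorted :
    ∀ (s : List Int), s.Pairwise (· ≤ ·) → ∀ v ∈ s, s.idxOf v = s.countP (fun w => decide (w < v)) := by
  intro s
  induction s with
  | nil => intro _ v hv; exact absurd hv (List.not_mem_nil)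
  | cons x xs ih =>
    intro hp v hv
    obtain ⟨hx, hp'⟩ := List.pairwise_cons.mp hp
    rw [List.countP_cons]
    by_cases hvx : v = x
    · subst hvx
      rw [List.idxOf_cons_self]
      have h0 : xs.countP (fun w => decide (w < v)) = 0 := by
        rw [List.countP_eq_zero]
        intro w hw
        simpa using not_lt.mpr (hx w hw)
      simp [h0]
    · have hm : v ∈ xs := (List.mem_cons.mp hv).resolve_left hvx
      rw [List.idxOf_cons_ne _ (fun he => hvx he.symm), ih hp' v hm]
      have hlt : x < v := lt_of_le_of_ne (hx v hm) (fun he => hvx he.symm)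
      simp [hlt]

-- one step of B's correction loop, seen through a lookup
theorem L_adjStep_getD (net : PySem.Dict (String × String) Int) (expo : PySem.Dict String Int)
    (k : String × String) (hk : k.1 ≠ k.2) (w : PySem.Dict String Int) (f : String) :
    (solAdjStep net expo w k).getD f 0 = w.getD f 0 + solDelta net expo f k := by
  have hL : ∀ (t1 t2 : String) (A B : Int),
      ((w.insert t2 A).insert t1 B).getD f 0
        = if f = t1 then B else if f = t2 then A else w.getD f 0 := by
    intro t1 t2 A B
    rw [PySem.Dict.getD_insert, PySem.Dict.getD_insert]
  have hS : ∀ (t : String) (A : Int), (w.insert t A).getD f 0 = if f = t then A else w.getD f 0 := by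
    intro t A
    rw [PySem.Dict.getD_insert]
  simp only [solAdjStep, solExpoAdj, solDelta]
  rcases lt_trichotomy (net.getD k 0) 0 with hd | hd | hd
  · rw [if_neg (show ¬ net.getD k 0 > 0 by omega), if_pos hd,
      if_neg (show ¬ net.getD k 0 = 0 by omega), if_neg (show ¬ net.getD k 0 > 0 by omega)]
    rcases lt_trichotomy (expo.getD k.1 0) (expo.getD k.2 0) with he | he | he
    · rw [if_neg (show ¬ expo.getD k.1 0 > expo.getD k.2 0 by omega),
        if_pos (show expo.getD k.2 0 > expo.getD k.1 0 by omega),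
        if_neg (show ¬ expo.getD k.1 0 > expo.getD k.2 0 by omega),
        if_pos (show expo.getD k.2 0 > expo.getD k.1 0 by omega),
        show (w.insert k.2 (w.getD k.2 0 + 1)).getD k.2 0 = w.getD k.2 0 + 1 from
          PySem.Dict.getD_insert_self _ _ _ _, hL]
      by_cases hf2 : f = k.2
      · subst hf2
        simp only [if_true]
        omega
      · simp only [if_neg hf2]
        omega
    · rw [if_neg (show ¬ expo.getD k.1 0 > expo.getD k.2 0 by omega),
        if_neg (show ¬ expo.getD k.2 0 > expo.getD k.1 0 by omega),
        if_neg (show ¬ expo.getD k.1 0 > expo.getD k.2 0 by omega),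
        if_neg (show ¬ expo.getD k.2 0 > expo.getD k.1 0 by omega), hS]
      by_cases hf2 : f = k.2
      · subst hf2
        simp only [if_true]
        omega
      · simp only [if_neg hf2]
        omega
    · rw [if_pos (show expo.getD k.1 0 > expo.getD k.2 0 by omega),
        if_pos (show expo.getD k.1 0 > expo.getD k.2 0 by omega),
        show (w.insert k.2 (w.getD k.2 0 + 1)).getD k.1 0 = w.getD k.1 0 from by
          rw [PySem.Dict.getD_insert, if_neg hk], hL]
      by_cases hf1 : f = k.1
      · subst hf1
        simp only [if_true, if_neg hk]
        omega
      · by_cases hf2 : f = k.2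
        · subst hf2
          simp only [if_true, if_neg hf1]
          omega
        · simp only [if_neg hf1, if_neg hf2]
          omega
  · simp [hd]
  · rw [if_pos hd, if_neg (show ¬ net.getD k 0 = 0 by omega), if_pos hd]
    rcases lt_trichotomy (expo.getD k.1 0) (expo.getD k.2 0) with he | he | he
    · rw [if_neg (show ¬ expo.getD k.1 0 > expo.getD k.2 0 by omega),
        if_pos (show expo.getD k.2 0 > expo.getD k.1 0 by omega),
        if_neg (show ¬ expo.getD k.1 0 > expo.getD k.2 0 by omega),
        if_pos (show expo.getD k.2 0 > expo.getD k.1 0 by omega),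
        show (w.insert k.1 (w.getD k.1 0 + 1)).getD k.2 0 = w.getD k.2 0 from by
          rw [PySem.Dict.getD_insert, if_neg (fun h => hk h.symm)], hL]
      by_cases hf2 : f = k.2
      · subst hf2
        simp only [if_true, if_neg (show ¬ (k.2 = k.1) from fun h => hk h.symm)]
        omega
      · by_cases hf1 : f = k.1
        · subst hf1
          simp only [if_true, if_neg hf2]
          omega
        · simp only [if_neg hf1, if_neg hf2]
          omega
    · rw [if_neg (show ¬ expo.getD k.1 0 > expo.getD k.2 0 by omega),
        if_neg (show ¬ expo.getD k.2 0 > expo.getD k.1 0 by omega),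
        if_neg (show ¬ expo.getD k.1 0 > expo.getD k.2 0 by omega),
        if_neg (show ¬ expo.getD k.2 0 > expo.getD k.1 0 by omega), hS]
      by_cases hf1 : f = k.1
      · subst hf1
        simp only [if_true]
        omega
      · simp only [if_neg hf1]
        omega
    · rw [if_pos (show expo.getD k.1 0 > expo.getD k.2 0 by omega),
        if_pos (show expo.getD k.1 0 > expo.getD k.2 0 by omega),
        show (w.insert k.1 (w.getD k.1 0 + 1)).getD k.1 0 = w.getD k.1 0 + 1 from
          PySem.Dict.getD_insert_self _ _ _ _, hL]
      by_cases hf1 : f = k.1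
      · subst hf1
        simp only [if_true]
        omega
      · simp only [if_neg hf1]
        omega

-- the whole correction loop, seen through a lookup
theorem L_adjFold (net : PySem.Dict (String × String) Int) (expo : PySem.Dict String Int) (f : String) :
    ∀ (ks : List (String × String)), (∀ k ∈ ks, k.1 ≠ k.2) → ∀ (w : PySem.Dict String Int),
    (ks.foldl (solAdjStep net expo) w).getD f 0 = w.getD f 0 + (ks.map (solDelta net expo f)).sum := by
  intro ks
  induction ks with
  | nil => intro _ w; simp
  | cons k ks ih =>
    intro h w
    simp only [List.foldl_cons, List.map_cons, List.sum_cons]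
    rw [ih (fun k' hk' => h k' (List.mem_cons_of_mem _ hk')) _,
      L_adjStep_getD net expo k (h k List.mem_cons_self)]
    ring

-- sum of a one-point indicator over a nodup list
theorem L_sum_indicator (g0 : String) (h : String → Int) :
    ∀ (L : List String), L.Nodup →
    (L.map (fun g => if g = g0 then h g else 0)).sum = if g0 ∈ L then h g0 else 0 := by
  intro L
  induction L with
  | nil => simp
  | cons x xs ih =>
    intro hnd
    obtain ⟨hx, hnd'⟩ := List.nodup_cons.mp hnd
    simp only [List.map_cons, List.sum_cons, List.mem_cons]
    rw [ih hnd']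
    by_cases hxg : x = g0
    · subst hxg
      rw [if_pos rfl, if_neg hx, if_pos (Or.inl rfl)]
      ring
    · rw [if_neg hxg]
      by_cases hm : g0 ∈ xs
      · rw [if_pos hm, if_pos (Or.inr hm)]
        ring
      · rw [if_neg hm, if_neg (by rintro (h | h); exact hxg h.symm; exact hm h)]
        ring

-- the canonical key of {x, y} has its components, and is strictly sorted for x ≠ y
theorem L_canon_mem (f g : String) (k : String × String) (h : solCanon f g = k) : f = k.1 ∨ f = k.2 := by
  simp only [solCanon] at h
  split_ifs at h <;> obtain ⟨h1, h2⟩ := Prod.mk.injEq .. ▸ h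
  · exact Or.inl h1
  · exact Or.inr h2

theorem L_canon_sorted (x y : String) (h : x ≠ y) : (solCanon x y).1 < (solCanon x y).2 := by
  simp only [solCanon]
  split_ifs with hlt
  · exact hlt
  · exact lt_of_le_of_ne (not_lt.mp hlt) (fun he => h he.symm)

theorem L_canon_comm (x y : String) (h : x ≠ y) : solCanon y x = solCanon x y := by
  simp only [solCanon]
  rcases lt_trichotomy x y with hlt | he | hgt
  · rw [if_pos hlt, if_neg (not_lt.mpr (le_of_lt hlt))]
  · exact absurd he h
  · rw [if_pos hgt, if_neg (not_lt.mpr (le_of_lt hgt))]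

theorem L_canon_eq_iff_left (f : String) (k : String × String) (hk : k.1 < k.2) (hf : f = k.1) (g : String) :
    (g ≠ f ∧ solCanon f g = k) ↔ g = k.2 := by
  subst hf
  constructor
  · rintro ⟨hgf, hc⟩
    simp only [solCanon] at hc
    by_cases hlt : k.1 < g
    · rw [if_pos hlt] at hc
      exact congrArg Prod.snd hc
    · rw [if_neg hlt] at hc
      exact absurd (show k.1 = k.2 from congrArg Prod.snd hc) (ne_of_lt hk)
  · rintro rfl
    refine ⟨fun h => lt_irrefl k.1 (h ▸ hk), ?_⟩
    simp only [solCanon]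
    rw [if_pos hk]

theorem L_canon_eq_iff_right (f : String) (k : String × String) (hk : k.1 < k.2) (hf : f = k.2) (g : String) :
    (g ≠ f ∧ solCanon f g = k) ↔ g = k.1 := by
  subst hf
  constructor
  · rintro ⟨hgf, hc⟩
    simp only [solCanon] at hc
    by_cases hlt : k.2 < g
    · rw [if_pos hlt] at hc
      exact absurd (show k.1 = k.2 from (congrArg Prod.fst hc).symm) (ne_of_lt hk)
    · rw [if_neg hlt] at hc
      exact congrArg Prod.fst hc
  · rintro rfl
    refine ⟨fun h => lt_irrefl k.2 (h ▸ hk), ?_⟩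
    simp only [solCanon]
    rw [if_neg (lt_asymm hk)]

-- converting the sum over net's keys into a sum over the friends
theorem L_sum_keys (f : String) (D : String → Int) (names : List String) (hnn : names.Nodup) :
    ∀ (ks : List (String × String)), ks.Nodup →
    (∀ k ∈ ks, k.1 < k.2 ∧ k.1 ∈ names ∧ k.2 ∈ names) →
    ∀ (δ : (String × String) → Int),
    (∀ k ∈ ks, δ k = if k.1 = f then D k.2 else if k.2 = f then D k.1 else 0) →
    (ks.map δ).sum = (names.map (fun g => if g ≠ f ∧ solCanon f g ∈ ks then D g else 0)).sum := by
  intro ks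
  induction ks with
  | nil => intro _ _ δ _; simp
  | cons k ks ih =>
    intro hnd hsh δ hδ
    obtain ⟨hknotin, hnd'⟩ := List.nodup_cons.mp hnd
    obtain ⟨hk12, hk1, hk2⟩ := hsh k List.mem_cons_self
    have hsplit : ∀ g, (if g ≠ f ∧ solCanon f g ∈ k :: ks then D g else 0)
        = (if g ≠ f ∧ solCanon f g = k then D g else 0) + (if g ≠ f ∧ solCanon f g ∈ ks then D g else 0) := by
      intro g
      by_cases h1 : g ≠ f ∧ solCanon f g = k
      · rw [if_pos ⟨h1.1, List.mem_cons.mpr (Or.inl h1.2)⟩, if_pos h1,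
          if_neg (by rintro ⟨_, h⟩; exact hknotin (h1.2 ▸ h))]
        ring
      · by_cases h2 : g ≠ f ∧ solCanon f g ∈ ks
        · rw [if_pos ⟨h2.1, List.mem_cons.mpr (Or.inr h2.2)⟩, if_neg h1, if_pos h2]
          ring
        · rw [if_neg (by
            rintro ⟨hg, hm⟩
            rcases List.mem_cons.mp hm with h | h
            · exact h1 ⟨hg, h⟩
            · exact h2 ⟨hg, h⟩), if_neg h1, if_neg h2]
          ring
    rw [List.map_cons, List.sum_cons,
      ih hnd' (fun k' hk' => hsh k' (List.mem_cons_of_mem _ hk')) δ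
        (fun k' hk' => hδ k' (List.mem_cons_of_mem _ hk')),
      List.map_congr_left (fun g _ => hsplit g), PySem.List.sum_map_add_int]
    have hδk := hδ k List.mem_cons_self
    by_cases hf1 : k.1 = f
    · have hfirst : (names.map (fun g => if g ≠ f ∧ solCanon f g = k then D g else 0)).sum = D k.2 := by
        rw [List.map_congr_left (fun g _ => by
          rw [show (if g ≠ f ∧ solCanon f g = k then D g else 0) = (if g = k.2 then D g else 0) from by
            by_cases h : g = k.2
            · rw [if_pos ((L_canon_eq_iff_left f k hk12 hf1.symm g).mpr h), if_pos h]
            · rw [if_neg (fun hh => h ((L_canon_eq_iff_left f k hk12 hf1.symm g).mp hh)), if_neg h]]),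
          L_sum_indicator k.2 D names hnn, if_pos hk2]
      rw [hfirst, hδk, if_pos hf1]
    · by_cases hf2 : k.2 = f
      · have hfirst : (names.map (fun g => if g ≠ f ∧ solCanon f g = k then D g else 0)).sum = D k.1 := by
          rw [List.map_congr_left (fun g _ => by
            rw [show (if g ≠ f ∧ solCanon f g = k then D g else 0) = (if g = k.1 then D g else 0) from by
              by_cases h : g = k.1
              · rw [if_pos ((L_canon_eq_iff_right f k hk12 hf2.symm g).mpr h), if_pos h]
              · rw [if_neg (fun hh => h ((L_canon_eq_iff_right f k hk12 hf2.symm g).mp hh)), if_neg h]]),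
            L_sum_indicator k.1 D names hnn, if_pos hk1]
        rw [hfirst, hδk, if_neg hf1, if_pos hf2]
      · have hfirst : (names.map (fun g => if g ≠ f ∧ solCanon f g = k then D g else 0)).sum = 0 := by
          rw [List.map_congr_left (fun g _ => by
            rw [if_neg (by
              rintro ⟨_, hc⟩
              rcases L_canon_mem f g k hc with h | h
              · exact hf1 h.symm
              · exact hf2 h.symm)])]
          simp
        rw [hfirst, hδk, if_neg hf1, if_neg hf2]

-- max? of an Int list via foldl max
theorem L_max?_foldl (xs : List Int) (m : Int) :
    PySem.List.max? (m :: xs) id = some (xs.foldl max m) := by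
  induction xs generalizing m with
  | nil => rfl
  | cons x xs ih =>
    have h1 : PySem.List.max? (m :: x :: xs) id = PySem.List.max? (max m x :: xs) id := by
      simp only [PySem.List.max?, List.foldl_cons, id_eq]
      congr 1
      split_ifs with hmx
      · exact congrArg some (max_eq_right (le_of_lt hmx)).symm
      · exact congrArg some (max_eq_left (by omega)).symm
    rw [h1, ih, List.foldl_cons]

theorem L_maxD_foldl (xs : List Int) (h : ∀ x ∈ xs, 0 ≤ x) :
    PySem.List.maxD xs id 0 = xs.foldl max 0 := by
  cases xs with
  | nil => rfl
  | cons x xs =>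
    rw [PySem.List.maxD, L_max?_foldl, Option.getD_some, List.foldl_cons]
    have hx : max 0 x = x := max_eq_right (h x (List.mem_cons_self))
    rw [hx]

-- foldl max over 0 only depends on the set of elements
theorem L_maxfold_set (L1 L2 : List Int) (h : ∀ x, x ∈ L1 ↔ x ∈ L2) :
    L1.foldl max 0 = L2.foldl max 0 := by
  apply le_antisymm
  · rcases PySem.List.foldl_max_mem L1 0 with h0 | hm
    · rw [h0]; exact (PySem.List.le_foldl_max L2 0).1
    · exact (PySem.List.le_foldl_max L2 0).2 _ ((h _).mp hm)
  · rcases PySem.List.foldl_max_mem L2 0 with h0 | hm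
    · rw [h0]; exact (PySem.List.le_foldl_max L1 0).1
    · exact (PySem.List.le_foldl_max L1 0).2 _ ((h _).mpr hm)

-- countP over nodup lists with the same members
theorem L_countP_nodup (L1 L2 : List String) (p : String → Bool)
    (h1 : L1.Nodup) (h2 : L2.Nodup) (h : ∀ x, x ∈ L1 ↔ x ∈ L2) :
    L1.countP p = L2.countP p := by
  have hp : L1.Perm L2 := (List.perm_ext_iff_of_nodup h1 h2).mpr h
  exact hp.countP_eq p

-- one friend g of f, seen from both sides: exponent default plus B's correction equals A's win test
theorem L_pointwise (gifts : List String) (ks : List (String × String)) (f g : String)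
    (hgf : g ≠ f)
    (hpm : solCanon f g ∈ ks ↔ ¬ (solCnt gifts f g = 0 ∧ solCnt gifts g f = 0)) :
    (if solExpo gifts g < solExpo gifts f then (1:Int) else 0)
      + (if g ≠ f ∧ solCanon f g ∈ ks then solDval gifts f g else 0)
    = (if g ≠ f ∧ solWin gifts f g then 1 else 0) := by
  by_cases hmem : solCanon f g ∈ ks
  · rw [if_pos (show g ≠ f ∧ solCanon f g ∈ ks from ⟨hgf, hmem⟩)]
    simp only [solDval, solNetv]
    by_cases hc : solCnt gifts f g - solCnt gifts g f = 0
    · rw [if_pos hc]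
      have hw : solWin gifts f g = decide (solExpo gifts f > solExpo gifts g) := by
        simp only [solWin]
        rw [if_pos (by omega)]
      by_cases he : solExpo gifts g < solExpo gifts f
      · rw [if_pos he, if_pos (show g ≠ f ∧ solWin gifts f g = true from
          ⟨hgf, by rw [hw]; exact decide_eq_true (by omega)⟩)]
        omega
      · rw [if_neg he, if_neg (show ¬ (g ≠ f ∧ solWin gifts f g = true) from by
          rintro ⟨_, hww⟩
          rw [hw] at hww
          exact he (by have := of_decide_eq_true hww; omega))]
        omega
    · rw [if_neg hc]
      have hw : solWin gifts f g = decide (solCnt gifts f g > solCnt gifts g f) := by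
        simp only [solWin]
        rw [if_neg (by omega)]
      by_cases hgt : solCnt gifts f g - solCnt gifts g f > 0
      · rw [if_pos hgt, if_pos (show g ≠ f ∧ solWin gifts f g = true from
          ⟨hgf, by rw [hw]; exact decide_eq_true (by omega)⟩)]
        by_cases he : solExpo gifts g < solExpo gifts f
        · rw [if_pos he]
          omega
        · rw [if_neg he]
          omega
      · rw [if_neg hgt, if_neg (show ¬ (g ≠ f ∧ solWin gifts f g = true) from by
          rintro ⟨_, hww⟩
          rw [hw] at hww
          exact hgt (by have := of_decide_eq_true hww; omega))]
        by_cases he : solExpo gifts g < solExpo gifts f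
        · rw [if_pos he]
          omega
        · rw [if_neg he]
          omega
  · rw [if_neg (show ¬ (g ≠ f ∧ solCanon f g ∈ ks) from fun h => hmem h.2)]
    have hz : solCnt gifts f g = 0 ∧ solCnt gifts g f = 0 := by
      by_contra hcon
      exact hmem (hpm.mpr hcon)
    have hw : solWin gifts f g = decide (solExpo gifts f > solExpo gifts g) := by
      simp only [solWin]
      rw [if_pos (by rw [hz.1, hz.2])]
    by_cases he : solExpo gifts g < solExpo gifts f
    · rw [if_pos he, if_pos (show g ≠ f ∧ solWin gifts f g = true from
        ⟨hgf, by rw [hw]; exact decide_eq_true (by omega)⟩)]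
      omega
    · rw [if_neg he, if_neg (show ¬ (g ≠ f ∧ solWin gifts f g = true) from by
        rintro ⟨_, hww⟩
        rw [hw] at hww
        exact he (by have := of_decide_eq_true hww; omega))]
      omega

-- ===== A-side lemmas (unchanged analysis of A's nested-dict fold) =====

-- A's gift fold: entries of the nested dict count parsed pairs
theorem L_ggA_val (gifts : List String) :
    ∀ (s : PySem.Dict String (PySem.Dict String Int) × PySem.Dict String Int) (f j : String),
    (((gifts.foldl solGiftStepA s).1).getD f .empty).getD j 0
      = ((s.1.getD f .empty).getD j 0) + ((gifts.map solParse).count (f, j) : Int) := by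
  induction gifts with
  | nil => simp
  | cons g gs ih =>
    intro s f j
    simp only [List.foldl_cons, List.map_cons]
    rw [ih]
    have hstep : ((solGiftStepA s g).1.getD f .empty).getD j 0
        = (s.1.getD f .empty).getD j 0 + (if (f, j) = solParse g then 1 else 0) := by
      simp only [solGiftStepA, solParse]
      simp only [PySem.Dict.getD_modify, Prod.mk.injEq]
      split_ifs <;>
        first
        | rfl | omega
        | (rw [PySem.Dict.getD_modify]; split_ifs <;> first | rfl | omega | simp_all)
        | simp_all
    rw [hstep, List.count_cons]
    by_cases h : (f, j) = solParse g
    case pos => simp [h]; omega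
    case neg => simp [h]; exact fun hh => h hh.symm

-- A's gift fold: the exponent dict holds given-minus-received
theorem L_expA (gifts : List String) :
    ∀ (s : PySem.Dict String (PySem.Dict String Int) × PySem.Dict String Int) (f : String),
    ((gifts.foldl solGiftStepA s).2).getD f 0
      = s.2.getD f 0 + (((gifts.map (fun g => (solParse g).1)).count f : Int)
          - ((gifts.map (fun g => (solParse g).2)).count f : Int)) := by
  induction gifts with
  | nil => simp
  | cons g gs ih =>
    intro s f
    simp only [List.foldl_cons, List.map_cons]
    rw [ih]
    have hstep : ((solGiftStepA s g).2).getD f 0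
        = s.2.getD f 0 + (if f = (solParse g).1 then 1 else 0) - (if f = (solParse g).2 then 1 else 0) := by
      simp only [solGiftStepA, solParse]
      simp only [PySem.Dict.getD_modify]
      split_ifs <;> first | rfl | omega | simp_all
    rw [hstep, List.count_cons, List.count_cons]
    by_cases h1 : f = (solParse g).1 <;> by_cases h2 : f = (solParse g).2 <;>
      simp [h1, h2] <;> push_cast <;> split_ifs <;> first | omega | simp_all

-- A's gift fold preserves the key sets of the rows of give_gifts (gifts stay within friends)
theorem L_ggA_keys (friends : List String) (gifts : List String)
    (hg : ∀ g ∈ gifts, (solParse g).1 ∈ friends ∧ (solParse g).2 ∈ friends ∧ (solParse g).1 ≠ (solParse g).2) :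
    ∀ (s : PySem.Dict String (PySem.Dict String Int) × PySem.Dict String Int),
    (∀ f ∈ friends, ((s.1.getD f .empty)).keys = PySem.List.dedup (friends.filter (fun j => j ≠ f))) →
    ∀ f ∈ friends, (((gifts.foldl solGiftStepA s).1).getD f .empty).keys
      = PySem.List.dedup (friends.filter (fun j => j ≠ f)) := by
  induction gifts with
  | nil => intro s hs f hf; exact hs f hf
  | cons g gs ih =>
    intro s hs f hf
    simp only [List.foldl_cons]
    refine ih (fun g' hg' => hg g' (List.mem_cons_of_mem _ hg')) _ ?_ f hf
    intro f' hf'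
    obtain ⟨hgv, hrc, hne⟩ := hg g List.mem_cons_self
    simp only [solParse] at hgv hrc hne
    simp only [solGiftStepA]
    rw [PySem.Dict.getD_modify]
    split_ifs with h1
    · rw [PySem.Dict.keys_modify]
      have hkeys := hs _ hgv
      have hmem : ((PySem.Str.split? g " ").getD []).getD 1 ""
          ∈ (s.1.getD (((PySem.Str.split? g " ").getD []).getD 0 "") .empty).keys := by
        rw [hkeys]
        rw [PySem.List.mem_dedup]
        exact List.mem_filter.mpr ⟨hrc, by simpa using hne.symm⟩
      have hc : (s.1.getD (((PySem.Str.split? g " ").getD []).getD 0 "") .empty).contains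
          (((PySem.Str.split? g " ").getD []).getD 1 "") = true := by
        rw [PySem.Dict.contains_iff_mem_keys]
        exact hmem
      rw [PySem.Dict.keys_insert_of_contains]
      · rw [h1]; exact hkeys
      · exact hc
    · exact hs f' hf'

-- proof-side names for the states the two ports build (definitionally equal to the ports' lets)
def solStA (friends : List String) (gifts : List String) :
    PySem.Dict String (PySem.Dict String Int) × PySem.Dict String Int :=
  gifts.foldl solGiftStepA
    (friends.foldl (fun d f =>
      d.insert f ((friends.filter (fun j => j ≠ f)).foldl (fun inner j => inner.insert j 0) .empty)) .empty,
     friends.foldl (fun d f => d.insert f (0 : Int)) .empty)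

def solPresentA (friends : List String) (gifts : List String) (f : String) : Int :=
  ((solStA friends gifts).1.getD f .empty).keys.foldl (fun present ggc =>
    let a := ((solStA friends gifts).1.getD f .empty).getD ggc 0
    let b := ((solStA friends gifts).1.getD ggc .empty).getD f 0
    if ((a == 0 && b == 0) || a == b) then
      (if (solStA friends gifts).2.getD f 0 > (solStA friends gifts).2.getD ggc 0 then present + 1 else present)
    else
      (if a > b then present + 1 else present)) 0

def solStB (gifts : List String) :
    PySem.Dict (String × String) Int × PySem.Dict String Int × PySem.Dict String Int :=
  gifts.foldl solGiftStepB (.empty, .empty, .empty)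

def solExpoDict (friends : List String) (gifts : List String) : PySem.Dict String Int :=
  (PySem.List.dedup friends).foldl
    (fun d f => d.insert f ((solStB gifts).2.1.getD f 0 - (solStB gifts).2.2.getD f 0)) .empty

def solValsB (friends : List String) (gifts : List String) : List Int :=
  PySem.List.sorted ((PySem.List.dedup friends).map (fun f => (solExpoDict friends gifts).getD f 0)) (fun v => v) false

def solFirstB (friends : List String) (gifts : List String) : PySem.Dict Int Int :=
  (PySem.List.enumerate (solValsB friends gifts)).foldl
    (fun d p => if d.contains p.2 then d else d.insert p.2 p.1) .empty

def solWins0 (friends : List String) (gifts : List String) : PySem.Dict String Int :=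
  (PySem.List.dedup friends).foldl
    (fun d f => d.insert f ((solFirstB friends gifts).getD ((solExpoDict friends gifts).getD f 0) 0)) .empty

def solWinsF (friends : List String) (gifts : List String) : PySem.Dict String Int :=
  (solStB gifts).1.keys.foldl
    (solAdjStep (solStB gifts).1 (solExpoDict friends gifts)) (solWins0 friends gifts)

theorem A_unfold (friends : List String) (gifts : List String) :
    solution friends gifts
      = friends.foldl (fun answer f => max answer (solPresentA friends gifts f)) 0 := rfl

theorem B_unfold (friends : List String) (gifts : List String) :
    solution_alt friends gifts
      = PySem.List.maxD ((PySem.List.dedup friends).map (fun f => (solWinsF friends gifts).getD f 0)) id 0 := rfl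

-- ===== VERDICT (by name: the statement is the Claim_ definition above) =====
theorem solution_spec : Claim_equal_solution := by
  intro friends gifts _ hpre
  show solution friends gifts = solution_alt friends gifts
  have hg : ∀ g ∈ gifts, (solParse g).1 ∈ friends ∧ (solParse g).2 ∈ friends ∧ (solParse g).1 ≠ (solParse g).2 := by
    intro g hgm
    obtain ⟨_, h2, h3, h4⟩ := hpre g hgm
    exact ⟨h2, h3, h4⟩
  -- ===== A-side facts =====
  have hcntA : ∀ f j, ((solStA friends gifts).1.getD f .empty).getD j 0 = solCnt gifts f j := by
    intro f j
    unfold solStA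
    rw [L_ggA_val]
    have hz : (((friends.foldl (fun d f =>
        d.insert f ((friends.filter (fun j => j ≠ f)).foldl (fun inner j => inner.insert j 0) PySem.Dict.empty))
        (PySem.Dict.empty : PySem.Dict String (PySem.Dict String Int))).getD f PySem.Dict.empty).getD j 0) = 0 := by
      rw [L_foldl_insert_getD]
      split_ifs with hf
      · rw [L_foldl_insert_getD]
        split_ifs <;> simp [PySem.Dict.getD_empty]
      · simp [PySem.Dict.getD_empty]
    rw [hz, zero_add]
    rfl
  have hexpA : ∀ f, (solStA friends gifts).2.getD f 0 = solExpo gifts f := by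
    intro f
    unfold solStA
    rw [L_expA, L_foldl_insert_getD]
    split_ifs <;> simp [PySem.Dict.getD_empty, solExpo]
  have hkeysA : ∀ f ∈ friends, ((solStA friends gifts).1.getD f .empty).keys
      = PySem.List.dedup (friends.filter (fun j => j ≠ f)) := by
    intro f hf
    unfold solStA
    refine L_ggA_keys friends gifts hg _ ?_ f hf
    intro f' hf'
    rw [L_foldl_insert_getD, if_pos hf']
    rw [PySem.Dict.keys_foldl_insert, PySem.Dict.keys_empty]
    rfl
  have hpresent : ∀ f ∈ friends, solPresentA friends gifts f
      = ((((PySem.List.dedup friends).filter (fun g => g ≠ f)).countP (fun g => solWin gifts f g)) : Int) := by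
    intro f hf
    unfold solPresentA
    rw [PySem.List.foldl_congr_mem _ _ (fun p ggc => if solWin gifts f ggc then p + 1 else p) 0 ?_]
    · rw [PySem.List.foldl_if_add_one, zero_add]
      rw [hkeysA f hf]
      exact_mod_cast congrArg Nat.cast (L_countP_nodup _ _ _
        (PySem.List.nodup_dedup _)
        ((PySem.List.nodup_dedup friends).filter _)
        (by intro x; simp [List.mem_filter]; try tauto))
    · intro p ggc _
      show (if _ then _ else _) = _
      rw [hcntA f ggc, hcntA ggc f, hexpA f, hexpA ggc]
      simp only [solWin]
      rcases eq_or_ne (solCnt gifts f ggc) (solCnt gifts ggc f) with hc | hc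
      · simp [hc]
      · have hz : ((solCnt gifts f ggc == 0 && solCnt gifts ggc f == 0) || solCnt gifts f ggc == solCnt gifts ggc f) = false := by
          by_cases h1 : solCnt gifts f ggc = 0 <;> by_cases h2 : solCnt gifts ggc f = 0 <;>
            simp [h1, h2, hc] <;> omega
        rw [hz]
        simp [hc]
  -- ===== B-side facts =====
  have hndn : (PySem.List.dedup friends).Nodup := PySem.List.nodup_dedup friends
  have hnetB : ∀ x y : String, x < y →
      (solStB gifts).1.getD (x, y) 0 = solNetv gifts x y := by
    intro x y hxy
    unfold solStB solNetv
    rw [L_netB x y hxy]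
    simp [PySem.Dict.getD_empty]
  have hexpB : ∀ f ∈ PySem.List.dedup friends, (solExpoDict friends gifts).getD f 0 = solExpo gifts f := by
    intro f hf
    unfold solExpoDict
    rw [L_foldl_insert_getD, if_pos hf]
    unfold solStB
    rw [L_givenB, L_recvB]
    simp [PySem.Dict.getD_empty, solExpo]
  have hkeysmem : ∀ k, k ∈ (solStB gifts).1.keys ↔ ∃ g ∈ gifts, solCanonParse g = k := by
    intro k
    unfold solStB
    rw [L_keysB_mem]
    simp [PySem.Dict.keys_empty]
  have hkeysnd : (solStB gifts).1.keys.Nodup := by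
    unfold solStB
    exact L_keysB_nodup gifts _ (by simp [PySem.Dict.keys_empty])
  have hkeyshape : ∀ k ∈ (solStB gifts).1.keys,
      k.1 < k.2 ∧ k.1 ∈ PySem.List.dedup friends ∧ k.2 ∈ PySem.List.dedup friends := by
    intro k hk
    obtain ⟨g, hgm, hcp⟩ := (hkeysmem k).mp hk
    obtain ⟨h1, h2, h3⟩ := hg g hgm
    have hlt := L_canon_sorted (solParse g).1 (solParse g).2 h3
    rw [show solCanon (solParse g).1 (solParse g).2 = solCanonParse g from rfl, hcp] at hlt
    have hcomp : (k.1 ∈ friends ∧ k.2 ∈ friends) := by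
      have : solCanonParse g = k := hcp
      simp only [solCanonParse, solCanon] at this
      split_ifs at this <;> obtain ⟨e1, e2⟩ := Prod.mk.injEq .. ▸ this
      · exact ⟨e1 ▸ h1, e2 ▸ h2⟩
      · exact ⟨e1 ▸ h2, e2 ▸ h1⟩
    exact ⟨hlt, (PySem.List.mem_dedup _ _).mpr hcomp.1, (PySem.List.mem_dedup _ _).mpr hcomp.2⟩
  -- the canonical key of {f, g} is in net's keys iff the two exchanged at least one gift
  have hpairmem : ∀ f g : String, f ≠ g →
      (solCanon f g ∈ (solStB gifts).1.keys ↔ ¬ (solCnt gifts f g = 0 ∧ solCnt gifts g f = 0)) := by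
    intro f g hfg
    rw [hkeysmem]
    constructor
    · rintro ⟨g', hg'm, hcp⟩ ⟨hz1, hz2⟩
      have hp : solParse g' = (f, g) ∨ solParse g' = (g, f) := by
        simp only [solCanonParse, solCanon] at hcp
        by_cases hab : (solParse g').1 < (solParse g').2
        · rw [if_pos hab] at hcp
          split_ifs at hcp <;> obtain ⟨e1, e2⟩ := Prod.mk.injEq .. ▸ hcp
          · left; rw [← e1, ← e2]
          · right; rw [← e1, ← e2]
        · rw [if_neg hab] at hcp
          split_ifs at hcp <;> obtain ⟨e1, e2⟩ := Prod.mk.injEq .. ▸ hcp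
          · right; rw [← e1, ← e2]
          · left; rw [← e1, ← e2]
      have hcnt : ∀ a b : String, solParse g' = (a, b) → solCnt gifts a b ≠ 0 := by
        intro a b hp
        simp only [solCnt]
        have : (a, b) ∈ gifts.map solParse := List.mem_map.mpr ⟨g', hg'm, hp⟩
        have := List.count_pos_iff.mpr this
        omega
      rcases hp with hp | hp
      · exact hcnt f g hp hz1
      · exact hcnt g f hp hz2
    · intro hnz
      have : solCnt gifts f g ≠ 0 ∨ solCnt gifts g f ≠ 0 := by tauto
      rcases this with h | h
      · have hpos : 0 < (gifts.map solParse).count (f, g) := by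
          simp only [solCnt] at h; omega
        obtain ⟨g', hg'm, hp⟩ := List.mem_map.mp (List.count_pos_iff.mp hpos)
        exact ⟨g', hg'm, by simp only [solCanonParse, hp]⟩
      · have hpos : 0 < (gifts.map solParse).count (g, f) := by
          simp only [solCnt] at h; omega
        obtain ⟨g', hg'm, hp⟩ := List.mem_map.mp (List.count_pos_iff.mp hpos)
        exact ⟨g', hg'm, by
          simp only [solCanonParse, hp]
          show solCanon g f = solCanon f g
          exact L_canon_comm f g hfg⟩
  -- base ranks: wins before the correction loop
  have hbase : ∀ f ∈ PySem.List.dedup friends, (solWins0 friends gifts).getD f 0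
      = (((PySem.List.dedup friends).countP (fun g => decide (solExpo gifts g < solExpo gifts f))) : Int) := by
    intro f hf
    unfold solWins0
    rw [L_foldl_insert_getD, if_pos hf]
    have hvmem : (solExpoDict friends gifts).getD f 0 ∈ solValsB friends gifts := by
      unfold solValsB
      rw [PySem.List.mem_sorted]
      exact List.mem_map.mpr ⟨f, hf, rfl⟩
    unfold solFirstB
    rw [L_first_gen, if_pos ⟨by simp [PySem.Dict.contains_empty], hvmem⟩, zero_add]
    have hsorted : (solValsB friends gifts).Pairwise (· ≤ ·) := by
      unfold solValsB
      exact PySem.List.sorted_pairwise _ _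
    rw [L_idxOf_sorted _ hsorted _ hvmem]
    have hperm : (solValsB friends gifts).Perm
        ((PySem.List.dedup friends).map (fun f => (solExpoDict friends gifts).getD f 0)) := by
      unfold solValsB
      exact PySem.List.sorted_perm _ _ _
    rw [hperm.countP_eq, List.countP_map]
    congr 1
    refine List.countP_congr (fun g hgm => ?_)
    simp only [Function.comp]
    simp only [hexpB g hgm, hexpB f hf]
  -- the correction loop adds the per-pair corrections
  have hδshape : ∀ f : String, ∀ k ∈ (solStB gifts).1.keys,
      solDelta (solStB gifts).1 (solExpoDict friends gifts) f k
        = if k.1 = f then solDval gifts f k.2 else if k.2 = f then solDval gifts f k.1 else 0 := by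
    intro f k hk
    obtain ⟨hk12, hk1, hk2⟩ := hkeyshape k hk
    have hnet : (solStB gifts).1.getD k 0 = solNetv gifts k.1 k.2 := hnetB k.1 k.2 hk12
    have he1 := hexpB k.1 hk1
    have he2 := hexpB k.2 hk2
    have hkne : k.1 ≠ k.2 := ne_of_lt hk12
    by_cases hf1 : k.1 = f
    · subst hf1
      simp only [solDelta, solDval, hnet, he1, he2, if_true, if_neg hkne,
        if_neg (show ¬ k.2 = k.1 from fun h => hkne h.symm)]
      by_cases hz : solNetv gifts k.1 k.2 = 0
      · rw [if_pos hz, if_pos hz]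
      · rw [if_neg hz, if_neg hz]
        congr 1
        · by_cases hpos : solNetv gifts k.1 k.2 > 0
          · rw [if_pos hpos, if_pos hpos]
            simp
          · rw [if_neg hpos, if_neg hpos]
            simp [hkne]
        · rcases lt_trichotomy (solExpo gifts k.1) (solExpo gifts k.2) with he | he | he
          · rw [if_neg (show ¬ solExpo gifts k.1 > solExpo gifts k.2 by omega),
              if_neg (show ¬ solExpo gifts k.1 > solExpo gifts k.2 by omega),
              if_pos (show solExpo gifts k.2 > solExpo gifts k.1 by omega)]
          · rw [if_neg (show ¬ solExpo gifts k.1 > solExpo gifts k.2 by omega),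
              if_neg (show ¬ solExpo gifts k.1 > solExpo gifts k.2 by omega),
              if_neg (show ¬ solExpo gifts k.2 > solExpo gifts k.1 by omega)]
          · rw [if_pos (show solExpo gifts k.1 > solExpo gifts k.2 by omega),
              if_pos (show solExpo gifts k.1 > solExpo gifts k.2 by omega)]
    · by_cases hf2 : k.2 = f
      · subst hf2
        simp only [solDelta, solDval, hnet, he1, he2, if_true, if_neg hkne,
          if_neg (show ¬ k.2 = k.1 from fun h => hkne h.symm)]
        have hanti : solNetv gifts k.1 k.2 = - solNetv gifts k.2 k.1 := by
          simp only [solNetv]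
          ring
        by_cases hz : solNetv gifts k.2 k.1 = 0
        · rw [if_pos (show solNetv gifts k.1 k.2 = 0 by omega), if_pos hz]
        · rw [if_neg (show ¬ solNetv gifts k.1 k.2 = 0 by omega), if_neg hz]
          congr 1
          · by_cases hpos : solNetv gifts k.2 k.1 > 0
            · rw [if_neg (show ¬ solNetv gifts k.1 k.2 > 0 by omega), if_pos hpos]
              simp
            · rw [if_pos (show solNetv gifts k.1 k.2 > 0 by omega), if_neg hpos]
              simp [show ¬ k.2 = k.1 from fun h => hkne h.symm]
          · rcases lt_trichotomy (solExpo gifts k.1) (solExpo gifts k.2) with he | he | he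
            · rw [if_neg (show ¬ solExpo gifts k.1 > solExpo gifts k.2 by omega),
                if_pos (show solExpo gifts k.2 > solExpo gifts k.1 by omega)]
            · rw [if_neg (show ¬ solExpo gifts k.1 > solExpo gifts k.2 by omega),
                if_neg (show ¬ solExpo gifts k.2 > solExpo gifts k.1 by omega)]
            · rw [if_pos (show solExpo gifts k.1 > solExpo gifts k.2 by omega),
                if_neg (show ¬ solExpo gifts k.2 > solExpo gifts k.1 by omega)]
      · simp only [solDelta, hnet, he1, he2]
        rw [if_neg hf1, if_neg hf2]
        by_cases hz : solNetv gifts k.1 k.2 = 0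
        · rw [if_pos hz]
        · rw [if_neg hz]
          have hplus : (if f = (if solNetv gifts k.1 k.2 > 0 then k.1 else k.2) then (1:Int) else 0) = 0 := by
            by_cases hpos : solNetv gifts k.1 k.2 > 0
            · rw [if_pos hpos, if_neg (fun h => hf1 h.symm)]
            · rw [if_neg hpos, if_neg (fun h => hf2 h.symm)]
          have hminus : (if solExpo gifts k.1 > solExpo gifts k.2 then (if f = k.1 then (1:Int) else 0)
              else if solExpo gifts k.2 > solExpo gifts k.1 then (if f = k.2 then (1:Int) else 0) else 0) = 0 := by
            rcases lt_trichotomy (solExpo gifts k.1) (solExpo gifts k.2) with he | he | he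
            · rw [if_neg (show ¬ solExpo gifts k.1 > solExpo gifts k.2 by omega),
                if_pos (show solExpo gifts k.2 > solExpo gifts k.1 by omega),
                if_neg (fun h => hf2 h.symm)]
            · rw [if_neg (show ¬ solExpo gifts k.1 > solExpo gifts k.2 by omega),
                if_neg (show ¬ solExpo gifts k.2 > solExpo gifts k.1 by omega)]
            · rw [if_pos (show solExpo gifts k.1 > solExpo gifts k.2 by omega),
                if_neg (fun h => hf1 h.symm)]
          rw [hplus, hminus]
          omega
  have hwinsF : ∀ f ∈ PySem.List.dedup friends, (solWinsF friends gifts).getD f 0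
      = ((((PySem.List.dedup friends).filter (fun g => g ≠ f)).countP (fun g => solWin gifts f g)) : Int) := by
    intro f hf
    unfold solWinsF
    rw [L_adjFold _ _ f _ (fun k hk => ne_of_lt (hkeyshape k hk).1)]
    rw [hbase f hf]
    rw [List.map_congr_left (fun k hk => hδshape f k hk),
      L_sum_keys f (solDval gifts f) (PySem.List.dedup friends) hndn _ hkeysnd
        (fun k hk => hkeyshape k hk)
        _ (fun k _ => rfl)]
    have hbsum : (((PySem.List.dedup friends).countP (fun g => decide (solExpo gifts g < solExpo gifts f))) : Int)
        = ((PySem.List.dedup friends).map (fun g => if solExpo gifts g < solExpo gifts f then (1:Int) else 0)).sum := by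
      rw [← PySem.List.sum_map_ite_one_zero]
      refine congrArg List.sum (List.map_congr_left (fun g _ => ?_))
      by_cases h : solExpo gifts g < solExpo gifts f <;> simp [h]
    rw [hbsum]
    rw [← PySem.List.sum_map_add_int]
    have hwsum : ((((PySem.List.dedup friends).filter (fun g => g ≠ f)).countP (fun g => solWin gifts f g)) : Int)
        = ((PySem.List.dedup friends).map (fun g => if g ≠ f ∧ solWin gifts f g then (1:Int) else 0)).sum := by
      rw [List.countP_filter, ← PySem.List.sum_map_ite_one_zero]
      refine congrArg List.sum (List.map_congr_left (fun g _ => ?_))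
      by_cases h1 : g ≠ f <;> by_cases h2 : solWin gifts f g <;> simp [h1, h2]
    rw [hwsum]
    congr 1
    refine List.map_congr_left (fun g hgm => ?_)
    by_cases hgf : g = f
    · subst hgf
      rw [if_neg (show ¬ solExpo gifts g < solExpo gifts g from lt_irrefl _),
        if_neg (show ¬ (g ≠ g ∧ solCanon g g ∈ (solStB gifts).1.keys) from fun h => h.1 rfl),
        if_neg (show ¬ (g ≠ g ∧ solWin gifts g g = true) from fun h => h.1 rfl)]
      omega
    · exact L_pointwise gifts _ f g hgf (hpairmem f g (fun h => hgf h.symm))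
  -- ===== assemble =====
  rw [A_unfold, B_unfold]
  rw [PySem.List.foldl_congr_mem friends _
    (fun a f => max a (((((PySem.List.dedup friends).filter (fun g => g ≠ f)).countP (fun g => solWin gifts f g)) : Int))) 0
    (fun acc f hf => by rw [hpresent f hf])]
  rw [List.map_congr_left (fun f hf => hwinsF f hf)]
  rw [L_maxD_foldl _ (by
    intro v hv
    obtain ⟨f, _, hfv⟩ := List.mem_map.mp hv
    rw [← hfv]
    exact Int.natCast_nonneg _)]
  rw [← List.foldl_map]
  exact L_maxfold_set _ _ (by
    intro v
    simp only [List.mem_map, PySem.List.mem_dedup]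
    try tauto)
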